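-- pv_equiv track=rewrite | github.com/narineneoldu/narineneoldu.github.io | shared/python/emit_render_json.py | parent_dirs_no_root
-- ===== SOURCE A (Python) =====
-- def parent_dirs_no_root(relpath: str):
--     """Yield all parent folders (posix) except root.
--        'a/b/c.qmd' -> ['a', 'a/b']"""
--     relpath = relpath.strip("/")
--     parts = relpath.split("/") if relpath else []
--     if not parts:
--         return
--     # drop filename
--     parts = parts[:-1]
--     cur = []
--     for p in parts:
--         cur.append(p)
--         yield "/".join(cur)
-- ===== SOURCE B (Python) =====
-- def parent_dirs_no_root(relpath: str):
--     """Yield all parent folders (posix) except root.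
--        Single streaming pass: emit the accumulated prefix at each '/'."""
--     relpath = relpath.strip("/")
--     pre = ""
--     for ch in relpath:
--         if ch == "/":
--             yield pre
--         pre += ch
-- ===== Notes on version B (the rewrite author's own statement) =====
-- stated objective: simpler
-- what changed: B replaces split('/')+dropping the last part+re-joining a growing parts list by a single streaming pass over the stripped string that emits the accumulated prefix at each '/'.
import Mathlib
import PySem

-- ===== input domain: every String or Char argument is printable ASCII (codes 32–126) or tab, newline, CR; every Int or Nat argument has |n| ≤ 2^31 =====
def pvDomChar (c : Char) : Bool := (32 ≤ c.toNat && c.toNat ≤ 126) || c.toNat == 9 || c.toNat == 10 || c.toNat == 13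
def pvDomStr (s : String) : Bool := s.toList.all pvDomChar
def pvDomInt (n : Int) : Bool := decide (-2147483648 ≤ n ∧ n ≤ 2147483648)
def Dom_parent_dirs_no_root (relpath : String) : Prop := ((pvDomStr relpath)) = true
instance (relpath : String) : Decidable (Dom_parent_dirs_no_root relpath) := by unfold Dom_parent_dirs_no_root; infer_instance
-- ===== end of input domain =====

-- B replaces split/dropLast/cumulative-join by a single streaming pass emitting the
-- accumulated prefix at each '/' (objective: simpler). Both are generators in Python;
-- equality is about the yielded sequence.

-- ===== PORT A =====
def parent_dirs_no_root (relpath : String) : List String :=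
  let r := PySem.Str.stripChars relpath "/"
  -- parts = relpath.split("/") if relpath else []   ('/'-split of a nonempty sep,
  -- written as Chars.splitOn on code points exactly as PySem.Str.split? does)
  let parts : List String :=
    if r = "" then [] else (PySem.Chars.splitOn r.toList ['/']).map String.ofList
  if parts = [] then []
  else
    let parts := parts.dropLast
    (parts.foldl (fun (st : List String × List String) p =>
        (st.1 ++ [p], st.2 ++ [PySem.Str.join "/" (st.1 ++ [p])])) ([], [])).2

-- ===== PORT B =====
def parent_dirs_no_root_alt (relpath : String) : List String :=
  let r := PySem.Str.stripChars relpath "/"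
  -- pre = ""; for ch in r: if ch == "/": yield pre; pre += ch
  (r.toList.foldl (fun (st : List Char × List String) ch =>
      (st.1 ++ [ch], if ch = '/' then st.2 ++ [String.ofList st.1] else st.2))
    ([], [])).2

-- ===== PRECONDITION & SPEC =====
def Spec_parent_dirs_no_root (relpath : String) (out : List String) : Prop := out = parent_dirs_no_root_alt relpath
instance (relpath : String) (out : List String) : Decidable (Spec_parent_dirs_no_root relpath out) := by unfold Spec_parent_dirs_no_root; infer_instance

-- ===== CLAIM (what is proved, stated in full; the proofs are below) =====
def Claim_equal_parent_dirs_no_root : Prop := ∀ (relpath : String), Dom_parent_dirs_no_root relpath → Spec_parent_dirs_no_root relpath (parent_dirs_no_root relpath)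

-- ===== LEMMAS AND PROOFS =====

/-- Structural form of `Chars.splitOn · ['/']`. -/
def mySplit : List Char → List (List Char)
  | [] => [[]]
  | c :: cs => if c = '/' then [] :: mySplit cs else (mySplit cs).modifyHead (c :: ·)

/-- The cumulative prefixes of `cs` ending right before each '/'. -/
def qspec : List Char → List (List Char)
  | [] => []
  | c :: cs =>
      if c = '/' then [] :: (qspec cs).map (fun z => '/' :: z)
      else (qspec cs).map (fun z => c :: z)

theorem mySplit_ne_nil (cs : List Char) : mySplit cs ≠ [] := by
  induction cs with
  | nil => simp [mySplit]
  | cons c cs ih =>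
      simp only [mySplit]
      split_ifs
      · simp
      · cases h : mySplit cs with
        | nil => exact absurd h ih
        | cons p ps => simp [List.modifyHead]

theorem go_eq : ∀ (fuel : Nat) (l cur : List Char) (acc : List (List Char)),
    l.length ≤ fuel →
    PySem.Chars.splitOn.go ['/'] fuel l cur acc
      = acc.reverse ++ (mySplit l).modifyHead (cur.reverse ++ ·) := by
  intro fuel
  induction fuel with
  | zero =>
      intro l cur acc h
      have : l = [] := by cases l <;> simp_all
      subst this
      simp [PySem.Chars.splitOn.go, mySplit, List.modifyHead]
  | succ n ih =>
      intro l cur acc h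
      cases l with
      | nil => simp [PySem.Chars.splitOn.go, mySplit, List.modifyHead]
      | cons c rest =>
          by_cases hc : c = '/'
          · subst hc
            have hpre : List.isPrefixOf ['/'] ('/' :: rest) = true := by
              simp [List.isPrefixOf]
            rw [PySem.Chars.splitOn.go]
            simp only [hpre, if_true]
            have hd : List.drop ['/'].length ('/' :: rest) = rest := rfl
            rw [hd, ih rest [] (cur.reverse :: acc) (by simpa using Nat.le_of_succ_le_succ h)]
            simp [mySplit, List.modifyHead]
            cases mySplit rest <;> rfl
          · have hpre : List.isPrefixOf ['/'] (c :: rest) = false := by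
              simp [List.isPrefixOf]
              exact fun h => hc h.symm
            rw [PySem.Chars.splitOn.go]
            simp only [hpre, Bool.false_eq_true, if_false]
            rw [ih rest (c :: cur) acc (by simpa using Nat.le_of_succ_le_succ h)]
            simp only [mySplit, hc, if_false]
            cases hms : mySplit rest with
            | nil => exact absurd hms (mySplit_ne_nil rest)
            | cons p ps => simp [List.modifyHead]

theorem splitOn_eq_mySplit (cs : List Char) :
    PySem.Chars.splitOn cs ['/'] = mySplit cs := by
  unfold PySem.Chars.splitOn
  rw [go_eq (cs.length + 1) cs [] [] (by omega)]
  cases h : mySplit cs with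
  | nil => exact absurd h (mySplit_ne_nil cs)
  | cons p ps => simp [List.modifyHead]

/-- intercalate over a nonempty tail. -/
theorem intercalate_cons_ne_nil (a : List Char) (L : List (List Char)) (h : L ≠ []) :
    List.intercalate ['/'] (a :: L) = a ++ '/' :: List.intercalate ['/'] L := by
  cases L with
  | nil => exact absurd rfl h
  | cons b t => simp [List.intercalate, List.intersperse]

/-- Merging a '/'-separated piece into the preceding one. -/
theorem join_merge (cur : List (List Char)) (r z : List Char) :
    PySem.Chars.join ['/'] ((cur ++ [r]) ++ [z])
      = PySem.Chars.join ['/'] (cur ++ [r ++ '/' :: z]) := by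
  induction cur with
  | nil => simp [PySem.Chars.join, List.intercalate, List.intersperse]
  | cons a t ih =>
      simp only [PySem.Chars.join] at ih ⊢
      simp only [List.cons_append]
      rw [intercalate_cons_ne_nil _ _ (by simp), intercalate_cons_ne_nil _ _ (by simp), ih]

/-- A-side loop, characterised on code points. -/
theorem afold_eq : ∀ (cs : List Char) (r : List Char)
    (cur out : List (List Char)),
    ((((mySplit cs).modifyHead (r ++ ·)).dropLast).foldl
        (fun (st : List (List Char) × List (List Char)) p =>
          (st.1 ++ [p], st.2 ++ [PySem.Chars.join ['/'] (st.1 ++ [p])])) (cur, out)).2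
      = out ++ (qspec cs).map (fun z => PySem.Chars.join ['/'] (cur ++ [r ++ z])) := by
  intro cs
  induction cs with
  | nil => intro r cur out; simp [mySplit, qspec, List.modifyHead]
  | cons c cs ih =>
      intro r cur out
      by_cases hc : c = '/'
      · subst hc
        simp only [mySplit, qspec, if_true]
        have hne := mySplit_ne_nil cs
        rw [List.modifyHead_cons]
        rw [List.dropLast_cons_of_ne_nil hne]
        rw [List.foldl_cons]
        have hid : (mySplit cs).modifyHead (fun x => [] ++ x) = mySplit cs := by
          cases mySplit cs <;> simp [List.modifyHead]
        rw [← hid]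
        rw [ih [] (cur ++ [r ++ []]) (out ++ [PySem.Chars.join ['/'] (cur ++ [r ++ []])])]
        simp only [List.append_nil, List.map_cons, List.map_map, List.append_assoc,
          List.singleton_append]
        congr 2
        apply List.map_congr_left
        intro z _
        simpa [Function.comp] using join_merge cur r z
      · simp only [mySplit, qspec, hc, if_false]
        have : ((mySplit cs).modifyHead (c :: ·)).modifyHead (r ++ ·)
            = (mySplit cs).modifyHead ((r ++ [c]) ++ ·) := by
          cases h : mySplit cs with
          | nil => simp [List.modifyHead]
          | cons p ps => simp [List.modifyHead]
        rw [this, ih (r ++ [c]) cur out]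
        simp only [List.map_map]
        congr 1
        apply List.map_congr_left
        intro z _
        simp [Function.comp]

/-- B-side loop, characterised. -/
theorem bfold_eq : ∀ (cs pre : List Char) (out : List String),
    (cs.foldl (fun (st : List Char × List String) ch =>
        (st.1 ++ [ch], if ch = '/' then st.2 ++ [String.ofList st.1] else st.2))
      (pre, out)).2
      = out ++ (qspec cs).map (fun z => String.ofList (pre ++ z)) := by
  intro cs
  induction cs with
  | nil => intro pre out; simp [qspec]
  | cons c cs ih =>
      intro pre out
      by_cases hc : c = '/'
      · subst hc
        simp only [List.foldl_cons, if_true]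
        rw [ih (pre ++ ['/']) (out ++ [String.ofList pre])]
        simp [qspec, List.map_map, Function.comp, List.append_assoc]
      · simp only [List.foldl_cons, hc, if_false]
        rw [ih (pre ++ [c]) out]
        simp [qspec, hc, List.map_map, Function.comp, List.append_assoc]

/-- join of strings equals join of char lists. -/
theorem str_join_ofList (cur : List (List Char)) (p : List Char) :
    PySem.Str.join "/" (cur.map String.ofList ++ [String.ofList p])
      = String.ofList (PySem.Chars.join ['/'] (cur ++ [p])) := by
  apply String.toList_inj.mp
  rw [PySem.Str.toList_join]
  simp [Function.comp_def]

/-- A-side string fold is the char fold, mapped through ofList. -/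
theorem afold_str (ps : List (List Char)) :
    ∀ (cur : List (List Char)) (out : List (List Char)),
    ((ps.map String.ofList).foldl (fun (st : List String × List String) p =>
        (st.1 ++ [p], st.2 ++ [PySem.Str.join "/" (st.1 ++ [p])]))
      (cur.map String.ofList, out.map String.ofList)).2
      = ((ps.foldl (fun (st : List (List Char) × List (List Char)) p =>
          (st.1 ++ [p], st.2 ++ [PySem.Chars.join ['/'] (st.1 ++ [p])])) (cur, out)).2).map String.ofList := by
  induction ps with
  | nil => intro cur out; simp
  | cons p ps ih =>
      intro cur out
      simp only [List.map_cons, List.foldl_cons]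
      rw [str_join_ofList]
      have h1 : cur.map String.ofList ++ [String.ofList p] = (cur ++ [p]).map String.ofList := by
        simp
      have h2 : out.map String.ofList ++ [String.ofList (PySem.Chars.join ['/'] (cur ++ [p]))]
          = (out ++ [PySem.Chars.join ['/'] (cur ++ [p])]).map String.ofList := by
        simp
      rw [h1, h2, ih]

-- ===== VERDICT (by name: the statement is the Claim_ definition above) =====
theorem parent_dirs_no_root_spec : Claim_equal_parent_dirs_no_root := by
  intro relpath _
  unfold Spec_parent_dirs_no_root parent_dirs_no_root parent_dirs_no_root_alt
  simp only []
  set r := PySem.Str.stripChars relpath "/" with hr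
  rw [bfold_eq r.toList [] []]
  by_cases h0 : r = ""
  · simp [h0, qspec]
  · have hne : r.toList ≠ [] := fun h => h0 (String.toList_eq_nil_iff.mp h)
    simp only [h0, if_false]
    rw [splitOn_eq_mySplit]
    have hparts : (mySplit r.toList).map String.ofList ≠ [] := by
      intro h
      exact mySplit_ne_nil r.toList (by simpa using h)
    simp only [hparts, if_false]
    rw [← List.map_dropLast]
    have hcast : ((mySplit r.toList).dropLast.map String.ofList).foldl
        (fun (st : List String × List String) p =>
          (st.1 ++ [p], st.2 ++ [PySem.Str.join "/" (st.1 ++ [p])])) ([], [])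
        = ((mySplit r.toList).dropLast.map String.ofList).foldl
        (fun (st : List String × List String) p =>
          (st.1 ++ [p], st.2 ++ [PySem.Str.join "/" (st.1 ++ [p])]))
        (([] : List (List Char)).map String.ofList, ([] : List (List Char)).map String.ofList) := rfl
    rw [hcast, afold_str]
    have hid : (mySplit r.toList).modifyHead (fun x => [] ++ x) = mySplit r.toList := by
      cases mySplit r.toList <;> simp [List.modifyHead]
    rw [show (mySplit r.toList).dropLast
        = ((mySplit r.toList).modifyHead (fun x => [] ++ x)).dropLast from by rw [hid]]
    rw [afold_eq r.toList [] [] []]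
    simp
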